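-- pv_equiv track=rewrite | github.com/Bushell53/MyWebPage_bushell53.com | app/actions/AOC_2015/p5_1.py | calculate
-- ===== SOURCE A (Python) =====
-- def calculate(input_string):
--     lines = input_string.splitlines()
--     goodlines = []
--     badlines = []
--
--     for line in lines:
--         lastchar = ""
--         meetsfirstif = False
--         vowelcount = 0
--
--         # Check for forbidden substrings
--         if any(sub in line for sub in ["ab", "cd", "pq", "xy"]):
--             badlines.append(line)
--             continue  # Skip further checks for this line
--
--         # Check for repeated characters
--         for char in line:
--             if lastchar == char:  # If the current character is the same as the last one
--                 meetsfirstif = True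
--                 break  # No need to check further; we found a repeated character
--             lastchar = char  # Update the last character
--
--         # If repeated characters are found, check for vowels
--         if meetsfirstif:
--             vowelcount = sum(1 for char in line if char in "aeiou")  # Count vowels
--             if vowelcount >= 3:
--                 goodlines.append(line)
--             else:
--                 badlines.append(line)
--         else:
--             badlines.append(line)
--
--     # Count the number of good lines
--     good_lines = len(goodlines)
--     return f"Number of good lines: {good_lines}"
-- ===== SOURCE B (Python) =====
-- def calculate(input_string):
--     count = 0
--     for line in input_string.splitlines():
--         prev = None
--         vowels = 0
--         repeat = False
--         bad = False
--         for ch in line: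
--             if ch in "aeiou":
--                 vowels += 1
--             if prev is not None:
--                 if prev == ch:
--                     repeat = True
--                 if (prev, ch) in (("a", "b"), ("c", "d"), ("p", "q"), ("x", "y")):
--                     bad = True
--             prev = ch
--         if not bad and repeat and vowels >= 3:
--             count += 1
--     return f"Number of good lines: {count}"
-- ===== Notes on version B (the rewrite author's own statement) =====
-- stated objective: alternative
-- what changed: Replaces A's three staged per-line passes (four substring searches, a break-on-repeat scan, then a vowel-count pass) with ONE streaming pass per line over (prev, ch) character pairs that simultaneously counts vowels, detects an adjacent repeat, and detects the forbidden substrings as pair hits (all four patterns have length 2), keeping only a counter instead of goodlines/badlines lists.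
import Mathlib
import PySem

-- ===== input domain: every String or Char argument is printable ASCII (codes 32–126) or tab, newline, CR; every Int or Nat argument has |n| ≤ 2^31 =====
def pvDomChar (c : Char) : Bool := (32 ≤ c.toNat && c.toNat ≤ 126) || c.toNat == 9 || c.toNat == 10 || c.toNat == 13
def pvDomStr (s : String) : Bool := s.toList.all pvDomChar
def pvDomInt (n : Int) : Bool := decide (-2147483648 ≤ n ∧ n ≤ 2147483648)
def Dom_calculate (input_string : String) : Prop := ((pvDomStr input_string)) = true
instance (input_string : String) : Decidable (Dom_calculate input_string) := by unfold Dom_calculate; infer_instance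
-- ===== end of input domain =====

-- B replaces A's three staged per-line passes (substring search, break-on-repeat scan, vowel pass)
-- with one streaming pass over (prev, ch) pairs tracking vowels/repeat/forbidden and a counter (objective: alternative).


-- ===== PORT A =====
-- Python's lastchar starts as "" (never equal to a 1-char string), so we carry it as a List Char.
def pvRepeatLoop : List Char → List Char → Bool
  | _, [] => false
  | last, c :: rest => if last == [c] then true else pvRepeatLoop [c] rest

def pvStepA (acc : List String × List String) (line : String) : List String × List String :=
  if ["ab", "cd", "pq", "xy"].any (fun sub => PySem.Str.isIn sub line) then
    (acc.1, acc.2 ++ [line])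
  else
    let meetsfirstif := pvRepeatLoop [] line.toList
    if meetsfirstif then
      let vowelcount : Int :=
        (line.toList.map (fun c => if PySem.Chars.isIn [c] "aeiou".toList then (1 : Int) else 0)).sum
      if 3 ≤ vowelcount then (acc.1 ++ [line], acc.2) else (acc.1, acc.2 ++ [line])
    else (acc.1, acc.2 ++ [line])

def calculate (input_string : String) : String :=
  let lines := PySem.Str.splitlines input_string
  let res := lines.foldl pvStepA ([], [])
  "Number of good lines: " ++ PySem.Int.toStr (res.1.length : Int)

-- ===== PORT B =====
-- "(prev, ch) in (('a','b'), ('c','d'), ('p','q'), ('x','y'))": membership in the 4-tuple of pairs.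
def pvForbidden (p c : Char) : Bool :=
  (p == 'a' && c == 'b') || (p == 'c' && c == 'd') || (p == 'p' && c == 'q') || (p == 'x' && c == 'y')

-- One step of B's single pass: state is (prev, vowels, repeat, bad).
def pvStepB (st : Option Char × Int × Bool × Bool) (ch : Char) : Option Char × Int × Bool × Bool :=
  let v := if ("aeiou".toList).contains ch then st.2.1 + 1 else st.2.1
  let r := match st.1 with | some p => st.2.2.1 || (p == ch) | none => st.2.2.1
  let b := match st.1 with | some p => st.2.2.2 || pvForbidden p ch | none => st.2.2.2
  (some ch, v, r, b)

def pvGoodB (line : String) : Bool :=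
  let st := line.toList.foldl pvStepB (none, 0, false, false)
  !st.2.2.2 && st.2.2.1 && decide (3 ≤ st.2.1)

def calculate_alt (input_string : String) : String :=
  let count := (PySem.Str.splitlines input_string).foldl
    (fun n line => if pvGoodB line then n + 1 else n) (0 : Int)
  "Number of good lines: " ++ PySem.Int.toStr count

-- ===== PRECONDITION & SPEC =====
def Spec_calculate (input_string : String) (out : String) : Prop := out = calculate_alt input_string
instance (input_string : String) (out : String) : Decidable (Spec_calculate input_string out) := by unfold Spec_calculate; infer_instance

-- ===== CLAIM =====
def Claim_equal_calculate : Prop := ∀ (input_string : String), Dom_calculate input_string → Spec_calculate input_string (calculate input_string)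

-- ===== LEMMAS AND PROOFS =====

-- Any adjacent pair of the list satisfies f.
def pvPairAny (f : Char → Char → Bool) : List Char → Bool
  | [] => false
  | [_] => false
  | a :: b :: t => f a b || pvPairAny f (b :: t)

theorem pvPairAny_or (f g : Char → Char → Bool) (cs : List Char) :
    pvPairAny (fun x y => f x y || g x y) cs = (pvPairAny f cs || pvPairAny g cs) := by
  induction cs with
  | nil => simp [pvPairAny]
  | cons c t ih =>
    cases t with
    | nil => simp [pvPairAny]
    | cons d t' =>
      simp only [pvPairAny, ih]
      cases f c d <;> cases g c d <;> simp

-- A length-2 pattern is an infix iff some adjacent pair matches it.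
theorem pvPair_infix (a b : Char) (cs : List Char) :
    pvPairAny (fun x y => x == a && y == b) cs = true ↔ [a, b] <:+: cs := by
  induction cs with
  | nil => simp [pvPairAny]
  | cons c t ih =>
    cases t with
    | nil =>
      simp only [pvPairAny, Bool.false_eq_true, false_iff]
      intro h
      have := h.length_le
      simp at this
    | cons d t' =>
      rw [List.infix_cons_iff]
      simp only [pvPairAny, Bool.or_eq_true, Bool.and_eq_true, beq_iff_eq, ih,
        List.cons_prefix_cons]
      constructor
      · rintro (⟨rfl, rfl⟩ | h)
        · exact Or.inl ⟨rfl, rfl, List.nil_prefix⟩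
        · exact Or.inr h
      · rintro (⟨rfl, rfl, -⟩ | h)
        · exact Or.inl ⟨rfl, rfl⟩
        · exact Or.inr h

-- A's four substring searches = B's forbidden-pair scan.
theorem pvForbidden_scan (line : String) :
    ["ab", "cd", "pq", "xy"].any (fun sub => PySem.Str.isIn sub line)
      = pvPairAny pvForbidden line.toList := by
  have h1 : pvForbidden = fun x y =>
      ((x == 'a' && y == 'b') || (x == 'c' && y == 'd')) ||
      ((x == 'p' && y == 'q') || (x == 'x' && y == 'y')) := by
    funext x y; simp [pvForbidden, Bool.or_assoc]
  have key : ∀ (a b : Char), PySem.Chars.isIn [a, b] line.toList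
      = pvPairAny (fun x y => x == a && y == b) line.toList := by
    intro a b
    cases h : pvPairAny (fun x y => x == a && y == b) line.toList
    · cases h2 : PySem.Chars.isIn [a, b] line.toList
      · rfl
      · have := (PySem.Chars.isIn_iff_infix _ _).1 h2
        rw [← pvPair_infix] at this
        simp [h] at this
    · exact (PySem.Chars.isIn_iff_infix _ _).2 ((pvPair_infix a b line.toList).1 h)
  rw [h1, pvPairAny_or, pvPairAny_or, pvPairAny_or]
  simp only [List.any, PySem.Str.isIn]
  rw [show ("ab" : String).toList = ['a', 'b'] from rfl,
      show ("cd" : String).toList = ['c', 'd'] from rfl,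
      show ("pq" : String).toList = ['p', 'q'] from rfl,
      show ("xy" : String).toList = ['x', 'y'] from rfl]
  rw [key, key, key, key]
  cases pvPairAny (fun x y => x == 'a' && y == 'b') line.toList <;>
    cases pvPairAny (fun x y => x == 'c' && y == 'd') line.toList <;>
    cases pvPairAny (fun x y => x == 'p' && y == 'q') line.toList <;>
    cases pvPairAny (fun x y => x == 'x' && y == 'y') line.toList <;> simp

-- A's break-loop = B's adjacent-equality pair scan.
theorem pvRepeat_cons (c : Char) (cs : List Char) :
    pvRepeatLoop [c] cs = pvPairAny (fun x y => x == y) (c :: cs) := by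
  induction cs generalizing c with
  | nil => simp [pvRepeatLoop, pvPairAny]
  | cons d t ih =>
    by_cases h : c = d
    · subst h; simp [pvRepeatLoop, pvPairAny]
    · simp [pvRepeatLoop, pvPairAny, h, ih]

theorem pvRepeat_scan (cs : List Char) :
    pvRepeatLoop [] cs = pvPairAny (fun x y => x == y) cs := by
  cases cs with
  | nil => simp [pvRepeatLoop, pvPairAny]
  | cons c t => simpa [pvRepeatLoop] using pvRepeat_cons c t

-- 'char in "aeiou"' on a single character is list membership.
theorem pvIsIn_singleton (c : Char) (l : List Char) :
    PySem.Chars.isIn [c] l = l.contains c := by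
  by_cases h : c ∈ l
  · have : [c] <:+: l := by
      obtain ⟨s, t, rfl⟩ := List.append_of_mem h
      exact ⟨s, t, by simp⟩
    simp [(PySem.Chars.isIn_iff_infix _ _).2 this, h]
  · have : ¬ ([c] <:+: l) := fun hinf => h (hinf.subset (by simp))
    have h2 : PySem.Chars.isIn [c] l = false := by
      cases hb : PySem.Chars.isIn [c] l
      · rfl
      · exact absurd ((PySem.Chars.isIn_iff_infix _ _).1 hb) this
    simp [h2, h]

-- Characterization of B's streaming fold once the first character has been consumed.
theorem pvFoldB_some (cs : List Char) (p : Char) (v : Int) (r b : Bool) :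
    ∃ q, cs.foldl pvStepB (some p, v, r, b) =
      (some q,
       v + (cs.countP (fun c => ("aeiou".toList).contains c) : Int),
       r || pvPairAny (fun x y => x == y) (p :: cs),
       b || pvPairAny pvForbidden (p :: cs)) := by
  induction cs generalizing p v r b with
  | nil => exact ⟨p, by simp [pvPairAny]⟩
  | cons c t ih =>
    obtain ⟨q, hq⟩ := ih c (if ("aeiou".toList).contains c then v + 1 else v)
      (r || (p == c)) (b || pvForbidden p c)
    refine ⟨q, ?_⟩
    simp only [List.foldl_cons, pvStepB, hq, pvPairAny, Prod.mk.injEq]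
    and_intros <;>
      first
        | rfl
        | (simp only [List.countP_cons]; split_ifs <;> push_cast <;> ring)
        | simp [Bool.or_assoc]

-- B's per-line predicate in terms of the three scans.
theorem pvGoodB_eq (line : String) :
    pvGoodB line =
      (!pvPairAny pvForbidden line.toList && pvPairAny (fun x y => x == y) line.toList &&
        decide (3 ≤ (line.toList.countP (fun c => ("aeiou".toList).contains c) : Int))) := by
  unfold pvGoodB
  cases hl : line.toList with
  | nil => simp [pvPairAny]
  | cons c t =>
    obtain ⟨q, hq⟩ := pvFoldB_some t c (if ("aeiou".toList).contains c then (0 : Int) + 1 else 0)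
      false false
    simp only [List.foldl_cons, pvStepB, hq, List.countP_cons]
    split_ifs <;> simp [Int.add_comm]

-- A's per-line classification appends to the good list exactly when B's predicate holds.
theorem pvStepA_eq (acc : List String × List String) (line : String) :
    pvStepA acc line =
      if pvGoodB line then (acc.1 ++ [line], acc.2) else (acc.1, acc.2 ++ [line]) := by
  have hva : (line.toList.map (fun c => if PySem.Chars.isIn [c] "aeiou".toList then (1 : Int) else 0)).sum
      = (line.toList.countP (fun c => ("aeiou".toList).contains c) : Int) := by
    rw [PySem.List.sum_map_ite_one_zero (fun c => PySem.Chars.isIn [c] "aeiou".toList) line.toList]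
    congr 1
    exact List.countP_congr (fun c _ => by rw [pvIsIn_singleton])
  unfold pvStepA
  rw [pvGoodB_eq, pvForbidden_scan, pvRepeat_scan, hva]
  by_cases hf : pvPairAny pvForbidden line.toList = true
  · simp [hf]
  · by_cases hz : pvPairAny (fun x y => x == y) line.toList = true
    · by_cases hv : 3 ≤ (line.toList.countP (fun c => ("aeiou".toList).contains c) : Int)
      · simp [hf, hz]
      · simp [hf, hz]
    · simp [hf, hz]

-- The fold's good-list length is B's counter.
theorem pvFold_len (lines : List String) (g b : List String) (n : Int) :
    ((lines.foldl pvStepA (g, b)).1.length : Int)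
      = (g.length : Int) - n + lines.foldl (fun n line => if pvGoodB line then n + 1 else n) n := by
  induction lines generalizing g b n with
  | nil => simp
  | cons l t ih =>
    simp only [List.foldl_cons, pvStepA_eq]
    by_cases h : pvGoodB l = true
    · simp only [h, if_true]
      rw [ih (g ++ [l]) b (n + 1)]
      simp only [List.length_append, List.length_cons, List.length_nil]
      push_cast
      ring
    · simp only [h, Bool.false_eq_true, if_false]
      rw [ih g (b ++ [l]) n]

-- ===== VERDICT =====
theorem calculate_spec : Claim_equal_calculate := by
  intro s _
  show calculate s = calculate_alt s
  simp only [calculate, calculate_alt]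
  have h := pvFold_len (PySem.Str.splitlines s) [] [] 0
  simp only [List.length_nil, Int.natCast_zero, zero_sub, neg_zero, zero_add] at h
  rw [h]
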